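-- pv_equiv track=rewrite | github.com/billyxs/notes.md | python/learning/python_morsels/2019-04-15_lstrip/lstrip.py | lstrip_4
-- ===== SOURCE A (Python) =====
-- def lstrip_4(iterable, strip_value):
--     """Return iterable with items removed from beginning"""
--     iterator= iter(iterable)
--     for item in iterator:
--         if item != strip_value:
--             yield item
--             break
--     for item in iterator:
--         yield item
-- ===== SOURCE B (Python) =====
-- def lstrip_4(iterable, strip_value):
--     """Return iterable with items removed from beginning"""
--     stripping = True
--     result = []
--     for item in iterable:
--         if stripping and item == strip_value:
--             continue
--         stripping = False
--         result.append(item)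
--     return result
-- ===== Notes on version B (the rewrite author's own statement) =====
-- stated objective: alternative
-- what changed: Replaced the two-loop generator (drop loop with break, then pass-through loop) by a single eager loop carrying an explicit stripping flag and accumulating a list.
import Mathlib
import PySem

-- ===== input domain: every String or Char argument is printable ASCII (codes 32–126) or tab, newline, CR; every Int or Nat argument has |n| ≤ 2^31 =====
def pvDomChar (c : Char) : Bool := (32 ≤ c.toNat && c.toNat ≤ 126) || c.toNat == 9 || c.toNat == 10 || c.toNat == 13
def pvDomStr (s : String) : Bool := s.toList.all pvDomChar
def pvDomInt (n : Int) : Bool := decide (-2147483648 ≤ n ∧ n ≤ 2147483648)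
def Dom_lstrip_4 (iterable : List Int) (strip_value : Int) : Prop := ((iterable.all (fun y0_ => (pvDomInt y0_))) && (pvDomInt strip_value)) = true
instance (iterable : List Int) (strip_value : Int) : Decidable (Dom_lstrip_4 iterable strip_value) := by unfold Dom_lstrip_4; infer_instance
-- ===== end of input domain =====

-- B replaces A's two-loop generator (drop-until-break, then pass-through) by one eager loop
-- with an explicit stripping flag; same output, objective: alternative decomposition.

-- ===== PORT A =====
-- first loop: consume items until one ≠ strip_value, yield it and break;
-- second loop: yield the remaining items of the iterator (here: the rest of the list).
def lstrip_4 (iterable : List Int) (strip_value : Int) : List Int :=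
  match iterable with
  | [] => []
  | x :: rest => if x ≠ strip_value then x :: rest else lstrip_4 rest strip_value

-- ===== PORT B =====
-- single fold carrying (stripping flag, accumulated result)
def lstrip4Step (strip_value : Int) (st : Bool × List Int) (item : Int) : Bool × List Int :=
  if st.1 && (item == strip_value) then st else (false, st.2 ++ [item])

def lstrip_4_alt (iterable : List Int) (strip_value : Int) : List Int :=
  (iterable.foldl (lstrip4Step strip_value) (true, [])).2

-- ===== PRECONDITION & SPEC =====
def Spec_lstrip_4 (iterable : List Int) (strip_value : Int) (out : List Int) : Prop := out = lstrip_4_alt iterable strip_value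
instance (iterable : List Int) (strip_value : Int) (out : List Int) : Decidable (Spec_lstrip_4 iterable strip_value out) := by unfold Spec_lstrip_4; infer_instance

-- ===== CLAIM (what is proved, stated in full; the proofs are below) =====
def Claim_equal_lstrip_4 : Prop := ∀ (iterable : List Int) (strip_value : Int), Dom_lstrip_4 iterable strip_value → Spec_lstrip_4 iterable strip_value (lstrip_4 iterable strip_value)

-- ===== LEMMAS AND PROOFS =====
theorem lstrip4_foldl_false (xs : List Int) (v : Int) (acc : List Int) :
    xs.foldl (lstrip4Step v) (false, acc) = (false, acc ++ xs) := by
  induction xs generalizing acc with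
  | nil => simp
  | cons x rest ih => simp [lstrip4Step, ih]

theorem lstrip4_foldl_true (xs : List Int) (v : Int) (acc : List Int) :
    (xs.foldl (lstrip4Step v) (true, acc)).2 = acc ++ lstrip_4 xs v := by
  induction xs generalizing acc with
  | nil => simp [lstrip_4]
  | cons x rest ih =>
    by_cases h : x = v
    · simp [lstrip4Step, h, lstrip_4, ih]
    · simp [lstrip4Step, h, lstrip_4, lstrip4_foldl_false]

-- ===== VERDICT (by name: the statement is the Claim_ definition above) =====
theorem lstrip_4_spec : Claim_equal_lstrip_4 := by
  intro xs v _
  unfold Spec_lstrip_4 lstrip_4_alt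
  simp [lstrip4_foldl_true]
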